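-- pv_equiv track=rewrite | github.com/fidabspd/algorithm | codes/baekjoon/1260-DFS와 BFS.py | dfs
-- ===== SOURCE A (Python) =====
-- def dfs(graph, v):
--     visited = []
--     stack = [v]
--
--     while stack:
--         n = stack.pop()
--         if n not in visited:
--             visited.append(n)
--             if n in graph:
--                 tmp = list(set(graph[n]) - set(visited))
--                 tmp.sort(reverse=True)  # stack이기 때문에 처음이 마지막으로 오도록.
--                 stack += tmp
--     return visited
-- ===== SOURCE B (Python) =====
-- def dfs(graph, v):
--     visited = []
--     seen = set()
--     stack = [iter([v])]
--     while stack: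
--         m = next(stack[-1], None)
--         if m is None:
--             stack.pop()
--             continue
--         if m not in seen:
--             seen.add(m)
--             visited.append(m)
--             stack.append(iter(sorted(set(graph.get(m, [])))))
--     return visited
-- ===== Notes on version B (the rewrite author's own statement) =====
-- stated objective: alternative
-- what changed: Replaces A's flat value stack with per-visit set differences, reverse sorts and list membership tests by the textbook iterative DFS over a stack of neighbour iterators with a 'seen' hash set, sorting each adjacency list once ascending.
import Mathlib
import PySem

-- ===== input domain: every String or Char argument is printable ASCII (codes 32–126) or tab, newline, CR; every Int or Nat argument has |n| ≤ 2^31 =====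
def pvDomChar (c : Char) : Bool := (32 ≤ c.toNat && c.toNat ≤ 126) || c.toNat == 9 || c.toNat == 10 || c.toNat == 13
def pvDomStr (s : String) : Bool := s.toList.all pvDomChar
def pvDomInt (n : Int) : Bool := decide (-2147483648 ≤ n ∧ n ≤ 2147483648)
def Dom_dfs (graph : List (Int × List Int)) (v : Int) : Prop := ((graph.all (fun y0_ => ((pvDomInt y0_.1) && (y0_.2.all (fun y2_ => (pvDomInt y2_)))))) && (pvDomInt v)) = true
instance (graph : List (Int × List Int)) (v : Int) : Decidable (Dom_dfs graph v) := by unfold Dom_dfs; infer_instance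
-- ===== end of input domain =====

-- B replaces A's flat value stack (per-visit set difference + reverse sort + list membership tests) by a
-- stack of per-node sorted neighbour iterators with a 'seen' set; same visit order, different algorithm.

-- Shared termination helpers (cited by the ports' decreasing_by proofs).

def pvValsF (graph : List (Int × List Int)) : Finset Int := (graph.flatMap Prod.snd).toFinset

theorem pvLexLe {A B : Finset Int} {la lb : Nat} (h : A ⊆ B) (hl : la < lb) :
    Prod.Lex (fun a b => a < b) (fun a b => a < b) (A.card, la) (B.card, lb) := by
  rcases lt_or_eq_of_le (Finset.card_le_card h) with hc | hc
  · exact Prod.Lex.left _ _ hc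
  · rw [hc]; exact Prod.Lex.right _ hl

theorem pvLexLt {A B : Finset Int} (la lb : Nat) (h : A ⊂ B) :
    Prod.Lex (fun a b => a < b) (fun a b => a < b) (A.card, la) (B.card, lb) :=
  Prod.Lex.left _ _ (Finset.card_lt_card h)

def pvNbrs (graph : List (Int × List Int)) (n : Int) : List Int :=
  PySem.Dict.getD (PySem.Dict.mk graph) n []

theorem pvNbrs_vals (graph : List (Int × List Int)) {x a : Int} (ha : a ∈ pvNbrs graph x) :
    a ∈ pvValsF graph := by
  unfold pvNbrs PySem.Dict.getD at ha
  cases hg : PySem.Dict.get? (PySem.Dict.mk graph) x with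
  | none => rw [hg] at ha; simp at ha
  | some adj =>
    rw [hg] at ha
    simp only [Option.getD_some] at ha
    have hmem := PySem.Dict.mem_items_of_get?_eq_some _ hg
    simp only [pvValsF, List.mem_toFinset, List.mem_flatMap]
    exact ⟨(x, adj), hmem, ha⟩

def pvAsc (graph : List (Int × List Int)) (n : Int) : List Int :=
  PySem.List.sorted (PySem.Set.ofList (pvNbrs graph n)) (fun x => x) false

theorem pvAsc_vals (graph : List (Int × List Int)) {x a : Int} (ha : a ∈ pvAsc graph x) :
    a ∈ pvValsF graph := by
  simp only [pvAsc, PySem.List.mem_sorted, PySem.Set.mem_ofList] at ha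
  exact pvNbrs_vals graph ha

-- ===== PORT A =====
-- Transliteration of A. Python pops/pushes at the END of `stack`; the Lean list keeps the stack
-- top at its HEAD, so popping is matching on the head and `stack += tmp` prepends `tmp.reverse`.
def dfsLoop (graph : List (Int × List Int)) (visited : List Int) (stack : List Int) : List Int :=
  match stack with
  | [] => visited
  | n :: rest =>
    if n ∈ visited then
      dfsLoop graph visited rest
    else
      match h : PySem.Dict.get? (PySem.Dict.mk graph) n with
      | some adj =>
          let tmp := PySem.List.sorted (PySem.Set.diff (PySem.Set.ofList adj) (visited ++ [n])) (fun x => x) true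
          dfsLoop graph (visited ++ [n]) (tmp.reverse ++ rest)
      | none => dfsLoop graph (visited ++ [n]) rest
termination_by (((stack.toFinset ∪ pvValsF graph) \ visited.toFinset).card, stack.length)
decreasing_by
  · apply pvLexLe
    · intro x hx
      simp only [Finset.mem_sdiff, Finset.mem_union, List.mem_toFinset, List.mem_cons] at hx ⊢
      tauto
    · simp
  · apply pvLexLt
    have hadj : ∀ a ∈ adj, a ∈ pvValsF graph := by
      intro a ha
      have hmem := PySem.Dict.mem_items_of_get?_eq_some _ h
      simp only [pvValsF, List.mem_toFinset, List.mem_flatMap]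
      exact ⟨(n, adj), hmem, ha⟩
    have hsub : (((PySem.List.sorted ((PySem.Set.ofList adj).diff (visited ++ [n])) (fun x => x) true).reverse ++ rest).toFinset ∪ pvValsF graph) \ (visited ++ [n]).toFinset
        ⊆ (((n :: rest).toFinset ∪ pvValsF graph) \ visited.toFinset) := by
      intro x hx
      simp only [Finset.mem_sdiff, Finset.mem_union, List.mem_toFinset, List.mem_cons,
        List.mem_append, List.mem_reverse, PySem.List.mem_sorted, PySem.Set.diff,
        List.mem_filter, PySem.Set.mem_ofList] at hx ⊢
      rcases hx with ⟨h1, h2⟩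
      refine ⟨?_, fun hv => h2 (Or.inl hv)⟩
      rcases h1 with (⟨ha, _⟩ | hr) | hV
      · exact Or.inr (hadj x ha)
      · exact Or.inl (Or.inr hr)
      · exact Or.inr hV
    refine (Finset.ssubset_iff_of_subset hsub).mpr ⟨n, ?_, ?_⟩
    · simp only [Finset.mem_sdiff, Finset.mem_union, List.mem_toFinset, List.mem_cons]
      tauto
    · simp only [Finset.mem_sdiff, Finset.mem_union, List.mem_toFinset, List.mem_append, List.mem_singleton]
      tauto
  · apply pvLexLt
    have hsub : ((rest.toFinset ∪ pvValsF graph) \ (visited ++ [n]).toFinset)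
        ⊆ (((n :: rest).toFinset ∪ pvValsF graph) \ visited.toFinset) := by
      intro x hx
      simp only [Finset.mem_sdiff, Finset.mem_union, List.mem_toFinset, List.mem_cons,
        List.mem_append] at hx ⊢
      tauto
    refine (Finset.ssubset_iff_of_subset hsub).mpr ⟨n, ?_, ?_⟩
    · simp only [Finset.mem_sdiff, Finset.mem_union, List.mem_toFinset, List.mem_cons]
      tauto
    · simp only [Finset.mem_sdiff, Finset.mem_union, List.mem_toFinset, List.mem_append, List.mem_singleton]
      tauto

def dfs (graph : List (Int × List Int)) (v : Int) : List Int :=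
  dfsLoop graph [] [v]

-- ===== PORT B =====
-- Transliteration of B (Source B): iterative DFS over a stack of neighbour iterators (modelled as their
-- lists of remaining elements, top at head) with a `seen` set; `sorted(set(graph.get(m, [])))` is pvAsc.
def dfsAltLoop (graph : List (Int × List Int)) (visited : List Int) (seen : PySem.Set Int)
    (stack : List (List Int)) : List Int :=
  match stack with
  | [] => visited
  | fr :: fs =>
    match fr with
    | [] => dfsAltLoop graph visited seen fs
    | m :: fr' =>
      if h : PySem.Set.contains seen m then
        dfsAltLoop graph visited seen (fr' :: fs)
      else
        dfsAltLoop graph (visited ++ [m]) (PySem.Set.add seen m) (pvAsc graph m :: fr' :: fs)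
termination_by (((stack.flatten.toFinset ∪ pvValsF graph) \ seen.toFinset).card,
                stack.flatten.length + stack.length)
decreasing_by
  · apply pvLexLe
    · intro x hx; simp only [List.flatten_cons] at hx ⊢; simpa using hx
    · simp
  · apply pvLexLe
    · intro x hx
      simp only [Finset.mem_sdiff, Finset.mem_union, List.mem_toFinset, List.flatten_cons,
        List.mem_append, List.mem_cons] at hx ⊢
      tauto
    · simp
  · apply pvLexLt
    have hm : m ∉ seen := by
      simpa [PySem.Set.contains] using h
    have hadd : PySem.Set.add seen m = seen ++ [m] := by
      simp [PySem.Set.add, PySem.Set.contains] at h ⊢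
      simp [h]
    have hasc : ∀ a ∈ pvAsc graph m, a ∈ pvValsF graph := fun a ha => pvAsc_vals graph ha
    have hsub : (((pvAsc graph m :: fr' :: fs).flatten.toFinset ∪ pvValsF graph) \ (PySem.Set.add seen m).toFinset)
        ⊆ ((((m :: fr') :: fs).flatten.toFinset ∪ pvValsF graph) \ seen.toFinset) := by
      intro x hx
      rw [hadd] at hx
      simp only [Finset.mem_sdiff, Finset.mem_union, List.mem_toFinset, List.flatten_cons,
        List.mem_append, List.mem_cons] at hx ⊢
      rcases hx with ⟨h1, h2⟩
      refine ⟨?_, fun hv => h2 (Or.inl hv)⟩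
      rcases h1 with (ha | hf | hfs) | hV
      · exact Or.inr (hasc x ha)
      · tauto
      · tauto
      · tauto
    refine (Finset.ssubset_iff_of_subset hsub).mpr ⟨m, ?_, ?_⟩
    · simp only [Finset.mem_sdiff, Finset.mem_union, List.mem_toFinset, List.flatten_cons,
        List.mem_append, List.mem_cons]
      tauto
    · rw [hadd]
      simp only [Finset.mem_sdiff, List.mem_toFinset, List.mem_append, List.mem_singleton]
      tauto

def dfs_alt (graph : List (Int × List Int)) (v : Int) : List Int :=
  dfsAltLoop graph [] PySem.Set.empty [[v]]

-- ===== PRECONDITION & SPEC =====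
def Spec_dfs (graph : List (Int × List Int)) (v : Int) (out : List Int) : Prop := out = dfs_alt graph v
instance (graph : List (Int × List Int)) (v : Int) (out : List Int) : Decidable (Spec_dfs graph v out) := by unfold Spec_dfs; infer_instance

-- ===== CLAIM =====
def Claim_equal_dfs : Prop := ∀ (graph : List (Int × List Int)) (v : Int), Dom_dfs graph v → Spec_dfs graph v (dfs graph v)

-- ===== LEMMAS AND PROOFS =====

theorem dfsLoop_nil (graph : List (Int × List Int)) (vis : List Int) : dfsLoop graph vis [] = vis := by
  rw [dfsLoop]

theorem dfsLoop_cons_mem (graph : List (Int × List Int)) (vis : List Int) {n : Int} (rest : List Int)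
    (h : n ∈ vis) : dfsLoop graph vis (n :: rest) = dfsLoop graph vis rest := by
  rw [dfsLoop]; simp [h]

theorem dfsLoop_cons_some (graph : List (Int × List Int)) (vis : List Int) {n : Int} (rest : List Int)
    {adj : List Int} (h : n ∉ vis) (hg : PySem.Dict.get? (PySem.Dict.mk graph) n = some adj) :
    dfsLoop graph vis (n :: rest) =
      dfsLoop graph (vis ++ [n])
        ((PySem.List.sorted (PySem.Set.diff (PySem.Set.ofList adj) (vis ++ [n])) (fun x => x) true).reverse ++ rest) := by
  rw [dfsLoop]
  simp only [h, reduceIte]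
  split
  next adj' heq => rw [heq] at hg; cases hg; rfl
  next heq => rw [heq] at hg; cases hg

theorem dfsLoop_cons_none (graph : List (Int × List Int)) (vis : List Int) {n : Int} (rest : List Int)
    (h : n ∉ vis) (hg : PySem.Dict.get? (PySem.Dict.mk graph) n = none) :
    dfsLoop graph vis (n :: rest) = dfsLoop graph (vis ++ [n]) rest := by
  rw [dfsLoop]
  simp only [h, reduceIte]
  split
  next adj' heq => rw [heq] at hg; cases hg
  next heq => rfl

theorem altLoop_nil (graph : List (Int × List Int)) (vis : List Int) (seen : PySem.Set Int) :
    dfsAltLoop graph vis seen [] = vis := by rw [dfsAltLoop]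

theorem altLoop_empty (graph : List (Int × List Int)) (vis : List Int) (seen : PySem.Set Int)
    (fs : List (List Int)) : dfsAltLoop graph vis seen ([] :: fs) = dfsAltLoop graph vis seen fs := by
  rw [dfsAltLoop]

theorem altLoop_skip (graph : List (Int × List Int)) (vis : List Int) (seen : PySem.Set Int)
    {m : Int} (fr : List Int) (fs : List (List Int)) (h : m ∈ seen) :
    dfsAltLoop graph vis seen ((m :: fr) :: fs) = dfsAltLoop graph vis seen (fr :: fs) := by
  rw [dfsAltLoop]
  simp [PySem.Set.contains, h]

theorem altLoop_visit (graph : List (Int × List Int)) (vis : List Int) (seen : PySem.Set Int)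
    {m : Int} (fr : List Int) (fs : List (List Int)) (h : m ∉ seen) :
    dfsAltLoop graph vis seen ((m :: fr) :: fs) =
      dfsAltLoop graph (vis ++ [m]) (seen ++ [m]) (pvAsc graph m :: fr :: fs) := by
  have hc : PySem.Set.contains seen m = false := by
    simp [PySem.Set.contains, h]
  rw [dfsAltLoop]
  simp [PySem.Set.add, h]

theorem altLoop_prefix (graph : List (Int × List Int)) (vis : List Int) (seen : PySem.Set Int)
    (stack : List (List Int)) : ∃ t, dfsAltLoop graph vis seen stack = vis ++ t := by
  induction vis, seen, stack using dfsAltLoop.induct graph with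
  | case1 vis seen => exact ⟨[], by rw [altLoop_nil]; simp⟩
  | case2 vis seen fs ih => rw [altLoop_empty]; exact ih
  | case3 vis seen fs n rest hc ih =>
      rw [altLoop_skip _ _ _ _ _ (by simpa [PySem.Set.contains, List.contains_iff_mem] using hc)]
      exact ih
  | case4 vis seen fs n rest hc ih =>
      rcases ih with ⟨t, ht⟩
      rw [altLoop_visit _ _ _ _ _ (by simpa [PySem.Set.contains, List.contains_iff_mem] using hc)]
      · refine ⟨[n] ++ t, ?_⟩
        rw [show seen ++ [n] = PySem.Set.add seen n from ?_] at *
        · rw [ht]; simp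
        · simp only [PySem.Set.add, PySem.Set.contains]
          rw [if_neg (by simpa using hc)]

theorem pvCardLt {U : Finset Int} {vis : List Int} {a : Int} (haU : a ∈ U) (ha : a ∉ vis) :
    (U \ (vis ++ [a]).toFinset).card < (U \ vis.toFinset).card := by
  apply Finset.card_lt_card
  have hsub : U \ (vis ++ [a]).toFinset ⊆ U \ vis.toFinset := by
    intro x hx
    simp only [Finset.mem_sdiff, List.mem_toFinset, List.mem_append] at hx ⊢
    tauto
  refine (Finset.ssubset_iff_of_subset hsub).mpr ⟨a, ?_, ?_⟩
  · simp only [Finset.mem_sdiff, List.mem_toFinset]; exact ⟨haU, ha⟩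
  · simp only [Finset.mem_sdiff, List.mem_toFinset, List.mem_append, List.mem_singleton]
    tauto

theorem pvCardLe {U : Finset Int} {vis w : List Int} (h : ∀ x ∈ vis, x ∈ w) :
    (U \ w.toFinset).card ≤ (U \ vis.toFinset).card := by
  apply Finset.card_le_card
  intro x hx
  simp only [Finset.mem_sdiff, List.mem_toFinset] at hx ⊢
  exact ⟨hx.1, fun hv => hx.2 (h x hv)⟩

theorem pvTmpRev (adj vis1 : List Int) :
    (PySem.List.sorted (PySem.Set.diff (PySem.Set.ofList adj) vis1) (fun x => x) true).reverse
    = (PySem.List.sorted (PySem.Set.ofList adj) (fun x => x) false).filter (fun a => !vis1.contains a) := by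
  have h := PySem.List.sorted_rev_eq_of_perm_of_pairwise_gt
    (xs := PySem.Set.diff (PySem.Set.ofList adj) vis1) (key := fun x => x)
    (ys := ((PySem.List.sorted (PySem.Set.ofList adj) (fun x => x) false).filter (fun a => !vis1.contains a)).reverse)
    ?_ ?_
  · rw [h, List.reverse_reverse]
  · exact (List.reverse_perm _).trans
      ((PySem.List.sorted_perm (PySem.Set.ofList adj) (fun x => x) false).filter _)
  · rw [List.pairwise_reverse]
    exact (PySem.List.sorted_ofList_pairwise_lt adj).filter _

theorem pvAsc_mem_nbrs {graph : List (Int × List Int)} {x a : Int} (ha : a ∈ pvAsc graph x) :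
    a ∈ pvNbrs graph x := by
  simpa only [pvAsc, PySem.List.mem_sorted, PySem.Set.mem_ofList] using ha

theorem pvCompose (graph : List (Int × List Int)) (U : Finset Int)
    (hU : ∀ x a, a ∈ pvNbrs graph x → a ∈ U) :
    ∀ k : Nat, ∀ vis F : List Int, ∀ fs : List (List Int),
      (U \ vis.toFinset).card ≤ k → (∀ a ∈ F, a ∈ U ∨ a ∈ vis) →
      dfsAltLoop graph vis vis (F :: fs) =
        dfsAltLoop graph (dfsAltLoop graph vis vis [F]) (dfsAltLoop graph vis vis [F]) fs := by
  intro k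
  induction k using Nat.strong_induction_on with
  | _ k IH =>
    intro vis F fs hk hF
    revert hF
    induction F with
    | nil =>
        intro hF
        rw [show dfsAltLoop graph vis vis [[]] = vis from by rw [altLoop_empty, altLoop_nil]]
        rw [altLoop_empty]
    | cons a F' ihF =>
        intro hF
        by_cases hmem : a ∈ vis
        · rw [altLoop_skip _ _ _ _ _ hmem, altLoop_skip _ _ _ _ _ hmem]
          exact ihF (fun b hb => hF b (List.mem_cons_of_mem _ hb))
        · have haU : a ∈ U := (hF a List.mem_cons_self).resolve_right hmem
          have hkk : (U \ (vis ++ [a]).toFinset).card < k :=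
            lt_of_lt_of_le (pvCardLt haU hmem) hk
          have hC : ∀ b ∈ pvAsc graph a, b ∈ U ∨ b ∈ vis ++ [a] :=
            fun b hb => Or.inl (hU a b (pvAsc_mem_nbrs hb))
          rw [altLoop_visit _ _ _ _ _ hmem, altLoop_visit _ _ _ _ _ hmem]
          have e1 := IH _ hkk (vis ++ [a]) (pvAsc graph a) (F' :: fs) le_rfl hC
          have e3 := IH _ hkk (vis ++ [a]) (pvAsc graph a) [F'] le_rfl hC
          set W := dfsAltLoop graph (vis ++ [a]) (vis ++ [a]) [pvAsc graph a] with hW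
          obtain ⟨t, ht⟩ := altLoop_prefix graph (vis ++ [a]) (vis ++ [a]) [pvAsc graph a]
          have hvisW : ∀ x ∈ vis ++ [a], x ∈ W := by
            intro x hx; rw [← hW] at ht; rw [ht]; exact List.mem_append_left _ hx
          have hkW : (U \ W.toFinset).card < k :=
            lt_of_le_of_lt (pvCardLe hvisW) hkk
          have hF'W : ∀ b ∈ F', b ∈ U ∨ b ∈ W := by
            intro b hb
            refine (hF b (List.mem_cons_of_mem _ hb)).imp id (fun hv => ?_)
            exact hvisW b (List.mem_append_left _ hv)
          have e2 := IH _ hkW W F' fs le_rfl hF'W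
          rw [e1, e3, e2]

theorem pvFilt (graph : List (Int × List Int)) (U : Finset Int)
    (hU : ∀ x a, a ∈ pvNbrs graph x → a ∈ U) :
    ∀ k : Nat, ∀ vis0 vis F : List Int,
      (U \ vis.toFinset).card ≤ k → (∀ a ∈ F, a ∈ U ∨ a ∈ vis) → (∀ x ∈ vis0, x ∈ vis) →
      dfsAltLoop graph vis vis [F.filter (fun a => !vis0.contains a)] =
        dfsAltLoop graph vis vis [F] := by
  intro k
  induction k using Nat.strong_induction_on with
  | _ k IH =>
    intro vis0 vis F hk hF h0
    revert hF
    induction F with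
    | nil => intro _; rfl
    | cons a F' ihF =>
        intro hF
        by_cases hin : a ∈ vis0
        · have hav : a ∈ vis := h0 a hin
          rw [List.filter_cons_of_neg (by simpa [List.contains_iff_mem] using hin)]
          rw [altLoop_skip _ _ _ _ _ hav]
          exact ihF (fun b hb => hF b (List.mem_cons_of_mem _ hb))
        · rw [List.filter_cons_of_pos (by simpa [List.contains_iff_mem] using hin)]
          by_cases hmem : a ∈ vis
          · rw [altLoop_skip _ _ _ _ _ hmem, altLoop_skip _ _ _ _ _ hmem]
            exact ihF (fun b hb => hF b (List.mem_cons_of_mem _ hb))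
          · have haU : a ∈ U := (hF a List.mem_cons_self).resolve_right hmem
            have hkk : (U \ (vis ++ [a]).toFinset).card < k :=
              lt_of_lt_of_le (pvCardLt haU hmem) hk
            have hC : ∀ b ∈ pvAsc graph a, b ∈ U ∨ b ∈ vis ++ [a] :=
              fun b hb => Or.inl (hU a b (pvAsc_mem_nbrs hb))
            rw [altLoop_visit _ _ _ _ _ hmem, altLoop_visit _ _ _ _ _ hmem]
            rw [pvCompose graph U hU _ (vis ++ [a]) (pvAsc graph a) [F'.filter (fun a => !vis0.contains a)] le_rfl hC]
            rw [pvCompose graph U hU _ (vis ++ [a]) (pvAsc graph a) [F'] le_rfl hC]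
            set W := dfsAltLoop graph (vis ++ [a]) (vis ++ [a]) [pvAsc graph a] with hW
            obtain ⟨t, ht⟩ := altLoop_prefix graph (vis ++ [a]) (vis ++ [a]) [pvAsc graph a]
            have hvisW : ∀ x ∈ vis ++ [a], x ∈ W := by
              intro x hx; rw [← hW] at ht; rw [ht]; exact List.mem_append_left _ hx
            have hkW : (U \ W.toFinset).card < k :=
              lt_of_le_of_lt (pvCardLe hvisW) hkk
            have hF'W : ∀ b ∈ F', b ∈ U ∨ b ∈ W := by
              intro b hb
              refine (hF b (List.mem_cons_of_mem _ hb)).imp id (fun hv => ?_)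
              exact hvisW b (List.mem_append_left _ hv)
            have h0W : ∀ x ∈ vis0, x ∈ W :=
              fun x hx => hvisW x (List.mem_append_left _ (h0 x hx))
            exact IH _ hkW vis0 W F' le_rfl hF'W h0W

theorem pvMain (graph : List (Int × List Int)) (U : Finset Int)
    (hU : ∀ x a, a ∈ pvNbrs graph x → a ∈ U) :
    ∀ k : Nat, ∀ vis L st : List Int,
      (U \ vis.toFinset).card ≤ k → (∀ a ∈ L, a ∈ U ∨ a ∈ vis) →
      dfsLoop graph vis (L ++ st) = dfsLoop graph (dfsAltLoop graph vis vis [L]) st := by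
  intro k
  induction k using Nat.strong_induction_on with
  | _ k IH =>
    intro vis L st hk hF
    revert hF
    induction L with
    | nil =>
        intro _
        rw [show dfsAltLoop graph vis vis [[]] = vis from by rw [altLoop_empty, altLoop_nil]]
        rfl
    | cons x L' ihL =>
        intro hF
        by_cases hmem : x ∈ vis
        · rw [List.cons_append, dfsLoop_cons_mem _ _ _ hmem, altLoop_skip _ _ _ _ _ hmem]
          exact ihL (fun b hb => hF b (List.mem_cons_of_mem _ hb))
        · have haU : x ∈ U := (hF x List.mem_cons_self).resolve_right hmem
          have hkk : (U \ (vis ++ [x]).toFinset).card < k :=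
            lt_of_lt_of_le (pvCardLt haU hmem) hk
          have hC : ∀ b ∈ pvAsc graph x, b ∈ U ∨ b ∈ vis ++ [x] :=
            fun b hb => Or.inl (hU x b (pvAsc_mem_nbrs hb))
          have hL' : ∀ b ∈ L', b ∈ U ∨ b ∈ vis ++ [x] := by
            intro b hb
            exact (hF b (List.mem_cons_of_mem _ hb)).imp id (fun hv => List.mem_append_left _ hv)
          rw [altLoop_visit _ _ _ _ _ hmem]
          cases hg : PySem.Dict.get? (PySem.Dict.mk graph) x with
          | none =>
              have hCnil : pvAsc graph x = [] := by
                simp [pvAsc, pvNbrs, PySem.Dict.getD, hg, PySem.Set.ofList, PySem.Set.empty,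
                  PySem.List.sorted]
              rw [List.cons_append, dfsLoop_cons_none _ _ _ hmem hg, hCnil, altLoop_empty]
              exact IH _ hkk (vis ++ [x]) L' st le_rfl hL'
          | some adj =>
              have hCadj : pvAsc graph x =
                  PySem.List.sorted (PySem.Set.ofList adj) (fun y => y) false := by
                simp [pvAsc, pvNbrs, PySem.Dict.getD, hg]
              rw [List.cons_append, dfsLoop_cons_some _ _ _ hmem hg]
              rw [pvTmpRev adj (vis ++ [x])]
              have hCf : ∀ b ∈ (pvAsc graph x).filter (fun a => !(vis ++ [x]).contains a),
                  b ∈ U ∨ b ∈ vis ++ [x] :=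
                fun b hb => hC b (List.mem_of_mem_filter hb)
              rw [show (PySem.List.sorted (PySem.Set.ofList adj) (fun y => y) false).filter
                    (fun a => !(vis ++ [x]).contains a)
                  = (pvAsc graph x).filter (fun a => !(vis ++ [x]).contains a) from by rw [hCadj]]
              rw [IH _ hkk (vis ++ [x]) _ (L' ++ st) le_rfl hCf]
              rw [pvFilt graph U hU _ (vis ++ [x]) (vis ++ [x]) (pvAsc graph x) le_rfl hC (fun _ h => h)]
              set W := dfsAltLoop graph (vis ++ [x]) (vis ++ [x]) [pvAsc graph x] with hW
              obtain ⟨t, ht⟩ := altLoop_prefix graph (vis ++ [x]) (vis ++ [x]) [pvAsc graph x]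
              have hvisW : ∀ y ∈ vis ++ [x], y ∈ W := by
                intro y hy; rw [← hW] at ht; rw [ht]; exact List.mem_append_left _ hy
              have hkW : (U \ W.toFinset).card < k :=
                lt_of_le_of_lt (pvCardLe hvisW) hkk
              have hF'W : ∀ b ∈ L', b ∈ U ∨ b ∈ W := by
                intro b hb
                refine (hF b (List.mem_cons_of_mem _ hb)).imp id (fun hv => ?_)
                exact hvisW b (List.mem_append_left _ hv)
              rw [IH _ hkW W L' st le_rfl hF'W]
              rw [pvCompose graph U hU _ (vis ++ [x]) (pvAsc graph x) [L'] le_rfl hC]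

-- ===== VERDICT =====
theorem dfs_spec : Claim_equal_dfs := by
  intro graph v _
  unfold Spec_dfs dfs dfs_alt
  have hU : ∀ x a, a ∈ pvNbrs graph x → a ∈ insert v (pvValsF graph) :=
    fun x a ha => Finset.mem_insert_of_mem (pvNbrs_vals graph ha)
  have h := pvMain graph (insert v (pvValsF graph)) hU (insert v (pvValsF graph)).card
    [] [v] [] (by simp) (by intro a ha; rw [List.mem_singleton] at ha; subst ha
                            exact Or.inl (Finset.mem_insert_self _ _))
  simp only [List.append_nil] at h
  rw [h, dfsLoop_nil]
  rfl
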